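-- pv_equiv track=rewrite | github.com/Nafiz-kodar/data_structure_problem | quiz2prac/shifftingArray.py | right_shift_array
-- ===== SOURCE A (Python) =====
-- def right_shift_array(arr):
--     if len(arr) == 0:
--         return arr
--     last_element = arr[-1]
--     for i in range(len(arr) - 1, 0, -1):
--         arr[i] = arr[i - 1]
--     arr[0] = last_element
--     return arr
-- ===== SOURCE B (Python) =====
-- def right_shift_array(arr):
--     arr[:] = arr[-1:] + arr[:-1]
--     return arr
-- ===== Notes on version B (the rewrite author's own statement) =====
-- stated objective: simpler
-- what changed: Replaces the index-by-index backward shifting loop (and its empty-list guard and last-element temporary) with one slice reconstruction arr[:] = arr[-1:] + arr[:-1] that builds the rotated list at once; same in-place mutation of the argument.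
import Mathlib
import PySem

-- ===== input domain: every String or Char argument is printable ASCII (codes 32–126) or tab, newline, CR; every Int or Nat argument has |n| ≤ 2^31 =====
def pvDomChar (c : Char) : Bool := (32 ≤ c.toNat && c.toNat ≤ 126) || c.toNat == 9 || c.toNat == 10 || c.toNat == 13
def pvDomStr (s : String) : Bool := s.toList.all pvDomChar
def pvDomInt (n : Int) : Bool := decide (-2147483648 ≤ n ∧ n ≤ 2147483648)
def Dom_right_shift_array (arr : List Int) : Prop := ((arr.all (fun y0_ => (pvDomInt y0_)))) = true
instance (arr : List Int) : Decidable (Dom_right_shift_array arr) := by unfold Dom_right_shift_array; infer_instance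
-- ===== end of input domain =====

-- B replaces A's backward element-by-element shifting loop with a single slice
-- reconstruction arr[:] = arr[-1:] + arr[:-1] (objective: simpler). Both A and B
-- mutate the argument list in place in Python; the equivalence proved here is
-- about the returned value (which is the mutated list itself in both).

-- ===== PORT A =====
def right_shift_array (arr : List Int) : List Int :=
  if arr.length = 0 then arr
  else
    let last_element := PySem.List.pyGetD arr (-1) 0
    let a := (PySem.List.pyRange ((arr.length : Int) - 1) 0 (-1)).foldl
        (fun a i => PySem.List.pySetD a i (PySem.List.pyGetD a (i - 1) 0)) arr
    PySem.List.pySetD a 0 last_element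

-- ===== PORT B =====
def right_shift_array_alt (arr : List Int) : List Int :=
  PySem.List.slice arr (some (-1)) none ++ PySem.List.slice arr none (some (-1))

-- ===== PRECONDITION & SPEC =====
def Spec_right_shift_array (arr : List Int) (out : List Int) : Prop := out = right_shift_array_alt arr
instance (arr : List Int) (out : List Int) : Decidable (Spec_right_shift_array arr out) := by unfold Spec_right_shift_array; infer_instance

-- ===== CLAIM (what is proved, stated in full; the proofs are below) =====
def Claim_equal_right_shift_array : Prop := ∀ (arr : List Int), Dom_right_shift_array arr → Spec_right_shift_array arr (right_shift_array arr)

-- ===== LEMMAS AND PROOFS =====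

-- The loop over range(m, 0, -1) rewrites a[i] := a[i-1] for i = m .. 1, so the
-- result keeps a[0], repeats a[0..m-1] shifted one to the right, and keeps the tail.
theorem rsa_loop_eq : ∀ (m : Nat) (a : List Int), m < a.length →
    (PySem.List.pyRange (m : Int) 0 (-1)).foldl
        (fun a i => PySem.List.pySetD a i (PySem.List.pyGetD a (i - 1) 0)) a
      = a.take 1 ++ a.take m ++ a.drop (m + 1) := by
  intro m
  induction m with
  | zero =>
    intro a _
    rw [PySem.List.pyRange_neg_one_eq_nil (by omega)]
    simpa using (List.take_append_drop 1 a).symm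
  | succ m ih =>
    intro a hm
    rw [show ((m + 1 : Nat) : Int) = (m : Int) + 1 by push_cast; ring,
        PySem.List.pyRange_neg_one_cons (by omega)]
    simp only [List.foldl_cons, show (m : Int) + 1 - 1 = (m : Int) by ring,
      PySem.List.pyGetD_natCast]
    rw [show (m : Int) + 1 = ((m + 1 : Nat) : Int) by push_cast; ring,
        PySem.List.pySetD_natCast]
    rw [ih _ (by rw [List.length_set]; omega)]
    have hset : a.set (m + 1) (a.getD m 0) =
        a.take (m + 1) ++ a.getD m 0 :: a.drop (m + 2) := by
      rw [List.set_eq_take_append_cons_drop, if_pos (by omega)]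
    rw [hset]
    have hlen : (a.take (m + 1)).length = m + 1 := by
      rw [List.length_take]; omega
    have h1 : a.take (m + 1) = a.take m ++ [a.getD m 0] := by
      rw [List.take_add_one, List.getElem?_eq_getElem (by omega : m < a.length),
          List.getD_eq_getElem a 0 (by omega : m < a.length)]
      rfl
    rw [List.take_append_of_le_length (by omega),
        List.take_append_of_le_length (by omega),
        List.take_take, List.take_take]
    have hdrop : (a.take (m + 1) ++ a.getD m 0 :: a.drop (m + 2)).drop (m + 1)
        = a.getD m 0 :: a.drop (m + 2) := by
      rw [List.drop_append_of_le_length (by omega), List.drop_of_length_le (by omega), List.nil_append]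
    rw [hdrop, h1]
    have : min 1 (m + 1) = 1 := by omega
    have : min m (m + 1) = m := by omega
    simp_all

-- ===== VERDICT (by name: the statement is the Claim_ definition above) =====
theorem right_shift_array_spec : Claim_equal_right_shift_array := by
  intro arr _
  unfold Spec_right_shift_array right_shift_array right_shift_array_alt
  rcases List.eq_nil_or_concat arr with rfl | ⟨ys, y, rfl⟩
  · simp [PySem.List.slice]
  · simp only [List.concat_eq_append]
    have hlen : (ys ++ [y]).length = ys.length + 1 := by simp
    rw [if_neg (by simp)]
    rw [show (((ys ++ [y]).length : Int) - 1) = ((ys.length : Nat) : Int) by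
          rw [hlen]; push_cast; ring]
    rw [rsa_loop_eq ys.length (ys ++ [y]) (by rw [hlen]; omega)]
    rw [PySem.List.slice_from_neg_one, PySem.List.slice_to_neg_one]
    rw [show (ys ++ [y]).take ys.length = ys from by simp,
        show (ys ++ [y]).drop (ys.length + 1) = [] from
          List.drop_of_length_le (by rw [hlen]),
        List.append_nil, List.dropLast_concat,
        show (ys ++ [y]).drop ((ys ++ [y]).length - 1) = [y] from by
          rw [hlen]; simp,
        PySem.List.pyGetD_neg_one_append_singleton]
    rcases ys with _ | ⟨c, t⟩ <;> simp [PySem.List.pySetD_of_nonneg]
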